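-- pv_equiv track=rewrite | github.com/Radioactive009/SHL-Chatbot-AI | app/agents/conversation_agent.py | should_refuse
-- ===== SOURCE A (Python) =====
-- def should_refuse(user_message):
--
--     blocked_topics = [
--         "salary",
--         "politics",
--         "religion",
--         "legal advice",
--         "girlfriend",
--         "boyfriend"
--     ]
--
--     message = user_message.lower()
--
--     return any(
--         topic in message
--         for topic in blocked_topics
--     )
-- ===== SOURCE B (Python) =====
-- def should_refuse(user_message):
--     topics = [
--         "salary",
--         "politics",
--         "religion",
--         "legal advice",
--         "girlfriend",
--         "boyfriend",
--     ]
--     message = user_message.lower()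
--     # One left-to-right pass; `active` holds partial matches (topic, chars matched).
--     active = []
--     for c in message:
--         nxt = [(t, j + 1) for (t, j) in active if t[j] == c]
--         nxt += [(t, 1) for t in topics if t[0] == c]
--         if any(j == len(t) for (t, j) in nxt):
--             return True
--         active = nxt
--     return False
-- ===== Notes on version B (the rewrite author's own statement) =====
-- stated objective: alternative
-- what changed: B replaces the per-topic substring tests by a single left-to-right pass over the lowered message that simulates a multi-pattern NFA: it maintains a worklist of partial matches (topic, matched length), advances/starts states on each character, and returns True as soon as a state completes.
import Mathlib
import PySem

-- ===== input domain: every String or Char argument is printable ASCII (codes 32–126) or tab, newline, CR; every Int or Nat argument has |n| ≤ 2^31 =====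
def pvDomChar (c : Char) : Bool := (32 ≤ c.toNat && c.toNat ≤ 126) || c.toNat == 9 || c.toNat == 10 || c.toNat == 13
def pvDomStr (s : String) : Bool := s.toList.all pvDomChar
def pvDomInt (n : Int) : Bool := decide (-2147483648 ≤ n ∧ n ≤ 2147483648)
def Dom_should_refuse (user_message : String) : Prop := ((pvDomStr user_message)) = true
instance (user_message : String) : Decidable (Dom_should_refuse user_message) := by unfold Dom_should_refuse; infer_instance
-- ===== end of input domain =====

-- B replaces the per-topic substring tests by one left-to-right pass simulating a multi-pattern NFA (alternative algorithm, same cost class).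


-- ===== PORT A =====
-- A: loop over the topic list, testing 'topic in message' for each.
def pvBlockedTopics : List String :=
  ["salary", "politics", "religion", "legal advice", "girlfriend", "boyfriend"]

def should_refuse (user_message : String) : Bool :=
  let message := PySem.Str.lower user_message
  pvBlockedTopics.any (fun topic => PySem.Str.isIn topic message)

-- ===== PORT B =====
-- B: one pass over the lowered message; `active` is the worklist of partial
-- matches (topic, chars matched); each character advances or starts states,
-- and a state reaching the topic's full length means a hit.
-- (Source B's `t[j] == c` is ported as `t[j]? = some c`; the loop invariant keeps j in range.)
def pvTopics : List (List Char) :=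
  (["salary", "politics", "religion", "legal advice", "girlfriend", "boyfriend"] : List String).map String.toList

def pvScan (active : List (List Char × Nat)) : List Char → Bool
  | [] => false
  | c :: rest =>
    let nxt :=
      (active.filterMap fun tj => if tj.1[tj.2]? = some c then some (tj.1, tj.2 + 1) else none)
      ++ (pvTopics.filterMap fun t => if t[0]? = some c then some (t, 1) else none)
    if nxt.any (fun tj => tj.2 = tj.1.length) then true
    else pvScan nxt rest

def should_refuse_alt (user_message : String) : Bool :=
  pvScan [] (PySem.Str.lower user_message).toList

-- ===== PRECONDITION & SPEC =====
def Spec_should_refuse (user_message : String) (out : Bool) : Prop := out = should_refuse_alt user_message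
instance (user_message : String) (out : Bool) : Decidable (Spec_should_refuse user_message out) := by unfold Spec_should_refuse; infer_instance

-- ===== CLAIM (what is proved, stated in full; the proofs are below) =====
def Claim_equal_should_refuse : Prop := ∀ (user_message : String), Dom_should_refuse user_message → Spec_should_refuse user_message (should_refuse user_message)

-- ===== LEMMAS AND PROOFS =====

theorem pvTopics_ne_nil : ∀ t ∈ pvTopics, t ≠ [] := by decide

-- a partial-match state (t, j), j in range, matches c :: rest iff it advances on c
theorem pvStateStep {t : List Char} {j : Nat} (h : j < t.length) (c : Char) (rest : List Char) :
    (t.drop j <+: c :: rest) ↔ (t[j]? = some c ∧ t.drop (j + 1) <+: rest) := by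
  rw [List.drop_eq_getElem_cons h, List.cons_prefix_cons, List.getElem?_eq_some_iff]
  constructor
  · rintro ⟨hc, hp⟩; exact ⟨⟨h, hc⟩, hp⟩
  · rintro ⟨⟨_, hc⟩, hp⟩; exact ⟨hc, hp⟩

-- a fresh nonempty pattern matches at the head of c :: rest iff it starts on c
theorem pvStartStep {t : List Char} (h : t ≠ []) (c : Char) (rest : List Char) :
    (t <+: c :: rest) ↔ (t[0]? = some c ∧ t.drop 1 <+: rest) := by
  have h0 : 0 < t.length := List.length_pos_iff.mpr h
  simpa using pvStateStep h0 c rest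

-- correctness of the worklist scan: it finds a match iff some live state
-- completes inside `rest` or some topic occurs inside `rest`
theorem pvScan_iff (rest : List Char) : ∀ (active : List (List Char × Nat)),
    (∀ tj ∈ active, tj.2 < tj.1.length) →
    (pvScan active rest = true ↔
      (∃ tj ∈ active, tj.1.drop tj.2 <+: rest) ∨ (∃ t ∈ pvTopics, t <:+: rest)) := by
  induction rest with
  | nil =>
    intro active h
    simp only [pvScan, Bool.false_eq_true, false_iff]
    rintro (⟨tj, hm, hp⟩ | ⟨t, hm, hi⟩)
    · have hd := List.prefix_nil.mp hp
      have hlt := h tj hm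
      have := List.drop_eq_nil_iff.mp hd
      omega
    · exact pvTopics_ne_nil t hm (List.infix_nil.mp hi)
  | cons c rest ih =>
    intro active h
    simp only [pvScan]
    set nxt :=
      (active.filterMap fun tj => if tj.1[tj.2]? = some c then some (tj.1, tj.2 + 1) else none)
      ++ (pvTopics.filterMap fun t => if t[0]? = some c then some (t, 1) else none) with hnxt
    have hmem : ∀ tj : List Char × Nat, tj ∈ nxt ↔
        ((tj.1, tj.2 - 1) ∈ active ∧ 1 ≤ tj.2 ∧ tj.1[tj.2 - 1]? = some c) ∨
        (tj.1 ∈ pvTopics ∧ tj.2 = 1 ∧ tj.1[0]? = some c) := by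
      intro tj
      simp only [hnxt, List.mem_append, List.mem_filterMap]
      constructor
      · rintro (⟨a, ha, hf⟩ | ⟨t, ht, hf⟩)
        · by_cases hc : a.1[a.2]? = some c
          · rw [if_pos hc] at hf; cases hf
            exact Or.inl ⟨by simpa using ha, by omega, by simpa using hc⟩
          · rw [if_neg hc] at hf; cases hf
        · by_cases hc : t[0]? = some c
          · rw [if_pos hc] at hf; cases hf
            exact Or.inr ⟨ht, rfl, hc⟩
          · rw [if_neg hc] at hf; cases hf
      · rintro (⟨ha, h1, hg⟩ | ⟨ht, h1, hg⟩)
        · refine Or.inl ⟨(tj.1, tj.2 - 1), ha, ?_⟩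
          rw [if_pos hg]
          have : tj.2 - 1 + 1 = tj.2 := by omega
          simp [this]
        · refine Or.inr ⟨tj.1, ht, ?_⟩
          rw [if_pos hg, ← h1]
    have hle : ∀ tj ∈ nxt, tj.2 ≤ tj.1.length := by
      intro tj hm
      rcases (hmem tj).mp hm with ⟨_, h1, hg⟩ | ⟨_, h1, hg⟩
      · have := (List.getElem?_eq_some_iff.mp hg).1; omega
      · have := (List.getElem?_eq_some_iff.mp hg).1; omega
    have hsem : ((∃ tj ∈ nxt, tj.1.drop tj.2 <+: rest) ∨ (∃ t ∈ pvTopics, t <:+: rest)) ↔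
        ((∃ tj ∈ active, tj.1.drop tj.2 <+: c :: rest) ∨ (∃ t ∈ pvTopics, t <:+: c :: rest)) := by
      constructor
      · rintro (⟨tj, hm, hp⟩ | ⟨t, hm, hi⟩)
        · rcases (hmem tj).mp hm with ⟨ha, h1, hg⟩ | ⟨ht, h1, hg⟩
          · refine Or.inl ⟨(tj.1, tj.2 - 1), ha, ?_⟩
            have hlt : tj.2 - 1 < tj.1.length := (List.getElem?_eq_some_iff.mp hg).1
            rw [pvStateStep hlt]
            have : tj.2 - 1 + 1 = tj.2 := by omega
            exact ⟨hg, by rwa [this]⟩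
          · refine Or.inr ⟨tj.1, ht, List.IsPrefix.isInfix ?_⟩
            rw [pvStartStep (pvTopics_ne_nil _ ht)]
            exact ⟨hg, by rwa [h1] at hp⟩
        · exact Or.inr ⟨t, hm, List.infix_cons_iff.mpr (Or.inr hi)⟩
      · rintro (⟨tj, hm, hp⟩ | ⟨t, hm, hi⟩)
        · have hlt := h tj hm
          rw [pvStateStep hlt] at hp
          refine Or.inl ⟨(tj.1, tj.2 + 1), ?_, hp.2⟩
          exact (hmem _).mpr (Or.inl ⟨by simpa using hm, by omega, by simpa using hp.1⟩)
        · rcases List.infix_cons_iff.mp hi with hpre | hinf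
          · rw [pvStartStep (pvTopics_ne_nil _ hm)] at hpre
            refine Or.inl ⟨(t, 1), ?_, hpre.2⟩
            exact (hmem _).mpr (Or.inr ⟨hm, rfl, hpre.1⟩)
          · exact Or.inr ⟨t, hm, hinf⟩
    by_cases hdone : nxt.any (fun tj => tj.2 = tj.1.length) = true
    · rw [if_pos hdone]
      simp only [true_iff]
      rcases List.any_eq_true.mp hdone with ⟨tj, hm, hj⟩
      refine hsem.mp (Or.inl ⟨tj, hm, ?_⟩)
      have : tj.1.drop tj.2 = [] := List.drop_eq_nil_iff.mpr (by simpa using le_of_eq (by exact_mod_cast (of_decide_eq_true hj).symm))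
      simp [this]
    · rw [if_neg hdone]
      have hlt : ∀ tj ∈ nxt, tj.2 < tj.1.length := by
        intro tj hm
        have hne : ¬ tj.2 = tj.1.length := by
          have hf := List.any_eq_false.mp (Bool.eq_false_iff.mpr hdone) tj hm
          simpa using hf
        have := hle tj hm
        omega
      rw [ih nxt hlt]
      exact hsem

-- ===== VERDICT (by name: the statement is the Claim_ definition above) =====
theorem should_refuse_spec : Claim_equal_should_refuse := by
  intro um _
  unfold Spec_should_refuse should_refuse should_refuse_alt
  rw [Bool.eq_iff_iff]
  rw [pvScan_iff _ [] (by simp)]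
  simp only [List.any_eq_true, PySem.Str.isIn_iff_infix, List.not_mem_nil, false_and,
    exists_false, false_or, pvTopics, List.mem_map]
  constructor
  · rintro ⟨t, ht, hi⟩
    exact ⟨t.toList, ⟨t, ht, rfl⟩, hi⟩
  · rintro ⟨p, ⟨t, ht, rfl⟩, hi⟩
    exact ⟨t, ht, hi⟩
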